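-- pv_equiv track=rewrite | github.com/sbarry753/cse123 | NET - In Development/build_guitar_dataset.py | normalize_chord_stem
-- ===== SOURCE A (Python) =====
-- def normalize_chord_stem(stem: str) -> str:
--     s = stem.strip()
--     s = s.replace("$", "#")
--     s = s.replace('-', ',')
--     s = s.replace('.', ',')
--     s = s.replace(';', ',')
--     while ',,' in s:
--         s = s.replace(',,', ',')
--     return s
-- ===== SOURCE B (Python) =====
-- _TR = str.maketrans({'$': '#', '-': ',', '.': ',', ';': ','})
--
-- def normalize_chord_stem(stem: str) -> str:
--     s = stem.strip().translate(_TR)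
--     out = []
--     for ch in s:
--         if ch == ',' and out and out[-1] == ',':
--             continue
--         out.append(ch)
--     return ''.join(out)
-- ===== Notes on version B (the rewrite author's own statement) =====
-- stated objective: simpler
-- what changed: The four chained global replaces become one translation table applied in a single pass, and the repeated full-string rescans that collapse doubled commas become one linear stateful pass that skips a comma whenever the previously kept character was a comma.
import Mathlib
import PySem

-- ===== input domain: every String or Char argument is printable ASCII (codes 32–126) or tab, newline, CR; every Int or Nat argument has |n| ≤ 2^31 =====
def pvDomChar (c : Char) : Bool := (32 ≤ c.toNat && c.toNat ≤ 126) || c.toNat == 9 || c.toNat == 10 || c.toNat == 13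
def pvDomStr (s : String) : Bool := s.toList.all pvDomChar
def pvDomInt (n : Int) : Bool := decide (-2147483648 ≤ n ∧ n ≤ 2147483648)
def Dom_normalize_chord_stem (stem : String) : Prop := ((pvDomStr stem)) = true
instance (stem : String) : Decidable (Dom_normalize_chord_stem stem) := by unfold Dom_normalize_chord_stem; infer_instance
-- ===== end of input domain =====

-- B replaces A's four chained global replaces and repeated ",," rescans by one
-- character-translation map plus a single stateful pass (objective: simpler).

-- ===== PORT A =====
-- the 'while ",," in s' loop; fuel is only a totality guard (each iteration
-- strictly shortens s, so s.length iterations always suffice)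
def pvLoopA : Nat → String → String
  | 0, s => s
  | Nat.succ fuel, s =>
      if PySem.Str.isIn ",," s then pvLoopA fuel (PySem.Str.replace s ",," ",") else s

def normalize_chord_stem (stem : String) : String :=
  let s0 := PySem.Str.strip stem
  let s1 := PySem.Str.replace s0 "$" "#"
  let s2 := PySem.Str.replace s1 "-" ","
  let s3 := PySem.Str.replace s2 "." ","
  let s4 := PySem.Str.replace s3 ";" ","
  pvLoopA s4.toList.length s4

-- ===== PORT B =====
-- the translation table str.maketrans({'$':'#','-':',','.':',',';':','})
def pvTr (c : Char) : Char :=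
  if c = '$' then '#'
  else if c = '-' then ','
  else if c = '.' then ','
  else if c = ';' then ','
  else c

-- one step of B's for-loop: skip a comma if out is nonempty and out[-1] is a comma
def pvStep (acc : List Char) (ch : Char) : List Char :=
  if ch = ',' ∧ acc ≠ [] ∧ acc.getLast? = some ',' then acc else acc ++ [ch]

def normalize_chord_stem_alt (stem : String) : String :=
  let s := (PySem.Str.strip stem).toList.map pvTr
  String.ofList (s.foldl pvStep [])

-- ===== PRECONDITION & SPEC =====
def Spec_normalize_chord_stem (stem : String) (out : String) : Prop := out = normalize_chord_stem_alt stem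
instance (stem : String) (out : String) : Decidable (Spec_normalize_chord_stem stem out) := by unfold Spec_normalize_chord_stem; infer_instance

-- ===== CLAIM (what is proved, stated in full; the proofs are below) =====
def Claim_equal_normalize_chord_stem : Prop := ∀ (stem : String), Dom_normalize_chord_stem stem → Spec_normalize_chord_stem stem (normalize_chord_stem stem)

-- ===== LEMMAS AND PROOFS =====

-- proof-side characterisation of PySem.Chars.replace (left-to-right, non-overlapping)
def pvRepl (old new : List Char) : List Char → List Char
  | [] => []
  | c :: t =>
      if old.isPrefixOf (c :: t) then new ++ pvRepl old new (t.drop (old.length - 1))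
      else c :: pvRepl old new t
termination_by l => l.length
decreasing_by
  · simpa using Nat.lt_succ_of_le (List.length_drop_le _ _)
  · simp

theorem pv_go_eq (old new : List Char) (hol : old ≠ []) :
    ∀ (fuel : Nat) (l acc : List Char), l.length ≤ fuel →
      PySem.Chars.replace.go old new fuel l acc = acc.reverse ++ pvRepl old new l := by
  intro fuel
  induction fuel with
  | zero =>
      intro l acc hl
      have : l = [] := List.length_eq_zero_iff.mp (Nat.le_zero.mp hl)
      subst this
      simp [PySem.Chars.replace.go, pvRepl]
  | succ fuel ih =>
      intro l acc hl
      cases l with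
      | nil => simp [PySem.Chars.replace.go, pvRepl]
      | cons c t =>
          rw [PySem.Chars.replace.go]
          by_cases hp : old.isPrefixOf (c :: t)
          · obtain ⟨o, os, rfl⟩ : ∃ o os, old = o :: os := by
              cases old with
              | nil => exact absurd rfl hol
              | cons o os => exact ⟨o, os, rfl⟩
            simp only [hp, if_pos]
            have hdrop : List.drop (o :: os).length (c :: t) = t.drop ((o :: os).length - 1) := by
              simp
            rw [hdrop, ih _ _ (le_trans (by simpa using Nat.sub_le t.length os.length)
                  (Nat.le_of_succ_le_succ hl))]
            rw [pvRepl, if_pos hp]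
            simp
          · simp only [hp, if_neg, Bool.false_eq_true, not_false_iff, if_neg]
            rw [ih _ _ (Nat.le_of_succ_le_succ hl)]
            rw [pvRepl, if_neg (by simpa using hp)]
            simp

theorem pv_replace_eq (l old new : List Char) (hol : old ≠ []) :
    PySem.Chars.replace l old new = pvRepl old new l := by
  rw [PySem.Chars.replace]
  rw [if_neg (by simpa using hol)]
  simpa using pv_go_eq old new hol l.length l [] le_rfl

-- a single-character replace is a map
theorem pv_repl_single (a b : Char) : ∀ l : List Char,
    pvRepl [a] [b] l = l.map (fun c => if c = a then b else c) := by
  intro l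
  induction l with
  | nil => simp [pvRepl]
  | cons c t ih =>
      rw [pvRepl]
      by_cases h : c = a
      · subst h
        rw [if_pos (by simp [List.isPrefixOf])]
        simp [ih]
      · rw [if_neg (by simp [List.isPrefixOf]; exact fun hh => h hh.symm)]
        simp [ih, h]

-- B's collapse automaton: state = "last kept character was a comma"
def pvColl (b : Bool) : List Char → List Char
  | [] => []
  | c :: t => if c = ',' ∧ b = true then pvColl b t else c :: pvColl (c == ',') t

theorem pvColl_comma_true (t : List Char) : pvColl true (',' :: t) = pvColl true t := by
  rw [pvColl, if_pos ⟨rfl, rfl⟩]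

theorem pvColl_cons (b : Bool) (c : Char) (t : List Char) (h : ¬ (c = ',' ∧ b = true)) :
    pvColl b (c :: t) = c :: pvColl (c == ',') t := by
  rw [pvColl, if_neg h]

theorem pvColl_comma_false (t : List Char) : pvColl false (',' :: t) = ',' :: pvColl true t := by
  rw [pvColl, if_neg (by simp)]
  norm_num

-- collapsing after one ",,"→"," replacement pass is the same as collapsing directly
theorem pv_coll_repl : ∀ (n : Nat) (l : List Char), l.length ≤ n → ∀ b : Bool,
    pvColl b (pvRepl [',', ','] [','] l) = pvColl b l := by
  intro n
  induction n with
  | zero =>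
      intro l hl b
      have : l = [] := List.length_eq_zero_iff.mp (Nat.le_zero.mp hl)
      subst this
      rw [pvRepl]
  | succ n ih =>
      intro l hl b
      cases l with
      | nil => rw [pvRepl]
      | cons c t =>
          rw [pvRepl]
          by_cases hp : List.isPrefixOf [',', ','] (c :: t)
          · cases t with
            | nil => simp [List.isPrefixOf] at hp
            | cons d t' =>
                have hc : ',' = c ∧ ',' = d := by simpa [List.isPrefixOf] using hp
                obtain ⟨rfl, rfl⟩ := hc
                rw [if_pos hp]
                have ht' : t'.length ≤ n := by
                  simp only [List.length_cons] at hl; omega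
                have hdrop : List.drop ([',', ','].length - 1) (',' :: t') = t' := rfl
                rw [hdrop]
                cases b with
                | true =>
                    simp only [List.singleton_append]
                    rw [pvColl_comma_true, pvColl_comma_true, pvColl_comma_true, ih t' ht' true]
                | false =>
                    simp only [List.singleton_append]
                    rw [pvColl_comma_false, pvColl_comma_false, pvColl_comma_true,
                      ih t' ht' true]
          · rw [if_neg hp]
            have ht : t.length ≤ n := by
              simp only [List.length_cons] at hl; omega
            by_cases hcb : c = ',' ∧ b = true
            · obtain ⟨rfl, rfl⟩ := hcb
              rw [pvColl, if_pos ⟨rfl, rfl⟩, pvColl, if_pos ⟨rfl, rfl⟩]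
              exact ih t ht true
            · rw [pvColl_cons _ _ _ hcb, pvColl_cons _ _ _ hcb, ih t ht]

-- the ",,"→"," pass never lengthens, and strictly shortens when ",," occurs
theorem pv_repl_len_le : ∀ (n : Nat) (l : List Char), l.length ≤ n →
    (pvRepl [',', ','] [','] l).length ≤ l.length := by
  intro n
  induction n with
  | zero =>
      intro l hl
      have : l = [] := List.length_eq_zero_iff.mp (Nat.le_zero.mp hl)
      subst this; simp [pvRepl]
  | succ n ih =>
      intro l hl
      cases l with
      | nil => simp [pvRepl]
      | cons c t =>
          rw [pvRepl]
          by_cases hp : List.isPrefixOf [',', ','] (c :: t)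
          · rw [if_pos hp]
            have hdrop : t.drop ([',', ','].length - 1) = t.drop 1 := rfl
            rw [hdrop]
            have h1 : (pvRepl [',', ','] [','] (t.drop 1)).length ≤ (t.drop 1).length :=
              ih _ (le_trans (by simpa using Nat.sub_le t.length 1) (Nat.le_of_succ_le_succ hl))
            simp only [List.singleton_append, List.length_cons, List.length_drop] at h1 ⊢
            omega
          · rw [if_neg hp]
            have := ih t (Nat.le_of_succ_le_succ hl)
            simp only [List.length_cons]
            omega

theorem pv_infix_tail {c : Char} {t : List Char} (h : [',', ','] <:+: (c :: t))
    (hp : ¬ List.isPrefixOf [',', ','] (c :: t)) : [',', ','] <:+: t := by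
  obtain ⟨s₁, s₂, he⟩ := h
  cases s₁ with
  | nil =>
      exfalso
      apply hp
      rw [List.isPrefixOf_iff_prefix]
      exact ⟨s₂, by simpa using he⟩
  | cons d s₁' =>
      refine ⟨s₁', s₂, ?_⟩
      have := congrArg List.tail he
      simpa using this

theorem pv_repl_len_lt : ∀ (n : Nat) (l : List Char), l.length ≤ n →
    [',', ','] <:+: l → (pvRepl [',', ','] [','] l).length < l.length := by
  intro n
  induction n with
  | zero =>
      intro l hl hinf
      have : l = [] := List.length_eq_zero_iff.mp (Nat.le_zero.mp hl)
      subst this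
      exact absurd (List.eq_nil_of_infix_nil hinf) (by simp)
  | succ n ih =>
      intro l hl hinf
      cases l with
      | nil => exact absurd (List.eq_nil_of_infix_nil hinf) (by simp)
      | cons c t =>
          rw [pvRepl]
          by_cases hp : List.isPrefixOf [',', ','] (c :: t)
          · rw [if_pos hp]
            have hdrop : t.drop ([',', ','].length - 1) = t.drop 1 := rfl
            rw [hdrop]
            have h1 := pv_repl_len_le t.length (t.drop 1) (by simpa using Nat.sub_le t.length 1)
            have ht1 : 1 ≤ t.length := by
              cases t with
              | nil => simp [List.isPrefixOf] at hp
              | cons d t' => simp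
            simp only [List.singleton_append, List.length_cons, List.length_drop] at h1 ⊢
            omega
          · rw [if_neg hp]
            have := ih t (Nat.le_of_succ_le_succ hl) (pv_infix_tail hinf hp)
            simp only [List.length_cons]
            omega

-- with no ",," present the collapse pass is the identity
theorem pv_coll_noinfix : ∀ (l : List Char), ¬ [',', ','] <:+: l →
    ∀ b : Bool, (b = true → l.head? ≠ some ',') → pvColl b l = l := by
  intro l
  induction l with
  | nil => intro _ b _; rfl
  | cons c t ih =>
      intro hinf b hb
      have hnb : ¬ (c = ',' ∧ b = true) := by
        rintro ⟨rfl, rfl⟩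
        exact hb rfl (by simp)
      rw [pvColl, if_neg hnb]
      have hinft : ¬ [',', ','] <:+: t := fun h => hinf (List.infix_cons h)
      rw [ih hinft (c == ',') ?_]
      intro hc ht
      apply hinf
      have : c = ',' := by simpa using hc
      subst this
      cases t with
      | nil => simp at ht
      | cons d t' =>
          have : d = ',' := by simpa using ht
          subst this
          exact ⟨[], t', by simp⟩

-- B's foldl accumulates exactly the collapse automaton's output
theorem pv_foldl_step : ∀ (cs acc : List Char),
    cs.foldl pvStep acc = acc ++ pvColl (acc.getLast? == some ',') cs := by
  intro cs
  induction cs with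
  | nil => intro acc; simp [pvColl]
  | cons c cs' ih =>
      intro acc
      rw [List.foldl_cons]
      by_cases h : c = ',' ∧ acc ≠ [] ∧ acc.getLast? = some ','
      · obtain ⟨rfl, hne, hl⟩ := h
        rw [pvStep, if_pos ⟨rfl, hne, hl⟩, ih]
        rw [pvColl, if_pos ⟨rfl, by simp [hl]⟩]
      · rw [pvStep, if_neg h, ih]
        have hlast : (acc ++ [c]).getLast? = some c := by simp
        rw [hlast]
        have hnb : ¬ (c = ',' ∧ (acc.getLast? == some ',') = true) := by
          rintro ⟨rfl, hbl⟩
          have hl : acc.getLast? = some ',' := by simpa using hbl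
          have hne : acc ≠ [] := by
            intro hnil; rw [hnil] at hl; simp at hl
          exact h ⟨rfl, hne, hl⟩
        rw [pvColl_cons _ _ _ hnb]
        simp

-- the while-loop computes the collapse automaton's result
theorem pv_loopA_eq : ∀ (fuel : Nat) (s : String), s.toList.length ≤ fuel →
    (pvLoopA fuel s).toList = pvColl false s.toList := by
  intro fuel
  induction fuel with
  | zero =>
      intro s hl
      have h : s.toList = [] := List.length_eq_zero_iff.mp (Nat.le_zero.mp hl)
      rw [pvLoopA, h]; rfl
  | succ fuel ih =>
      intro s hl
      rw [pvLoopA]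
      by_cases hin : PySem.Str.isIn ",," s = true
      · rw [if_pos hin]
        have hinf : [',', ','] <:+: s.toList := by
          have := (PySem.Str.isIn_iff_infix (sub := ",,") (s := s)).mp hin
          simpa using this
        have htl : (PySem.Str.replace s ",," ",").toList
            = pvRepl [',', ','] [','] s.toList := by
          show (String.ofList (PySem.Chars.replace s.toList ",,".toList ",".toList)).toList = _
          rw [String.toList_ofList]
          exact pv_replace_eq _ _ _ (by simp)
        have hlen := pv_repl_len_lt s.toList.length s.toList le_rfl hinf
        rw [ih _ (by rw [htl]; omega)]
        rw [htl, pv_coll_repl s.toList.length s.toList le_rfl false]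
      · rw [if_neg hin]
        have hinf : ¬ [',', ','] <:+: s.toList := by
          intro h
          apply hin
          rw [PySem.Str.isIn_iff_infix]
          simpa using h
        exact (pv_coll_noinfix s.toList hinf false (by simp)).symm

-- the four single-character replaces compose to the translation table
theorem pv_tr_comp (c : Char) :
    (if (if (if (if c = '$' then '#' else c) = '-' then ',' else (if c = '$' then '#' else c)) = '.'
        then ','
        else (if (if c = '$' then '#' else c) = '-' then ',' else (if c = '$' then '#' else c))) = ';'
      then ','
      else (if (if (if c = '$' then '#' else c) = '-' then ',' else (if c = '$' then '#' else c)) = '.'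
        then ','
        else (if (if c = '$' then '#' else c) = '-' then ',' else (if c = '$' then '#' else c))))
    = pvTr c := by
  by_cases h1 : c = '$' <;> by_cases h2 : c = '-' <;> by_cases h3 : c = '.' <;>
    by_cases h4 : c = ';' <;> simp_all [pvTr]

-- ===== VERDICT (by name: the statement is the Claim_ definition above) =====
set_option maxHeartbeats 1000000 in
theorem normalize_chord_stem_spec : Claim_equal_normalize_chord_stem := by
  intro stem _
  unfold Spec_normalize_chord_stem normalize_chord_stem normalize_chord_stem_alt
  apply String.toList_inj.mp
  rw [String.toList_ofList, pv_foldl_step]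
  simp only [List.getLast?_nil, List.nil_append]
  rw [pv_loopA_eq _ _ le_rfl]
  have hch : (PySem.Str.replace (PySem.Str.replace (PySem.Str.replace (PySem.Str.replace
      (PySem.Str.strip stem) "$" "#") "-" ",") "." ",") ";" ",").toList
      = (PySem.Str.strip stem).toList.map pvTr := by
    simp only [PySem.Str.replace, String.toList_ofList]
    have e1 : ("$".toList) = ['$'] := rfl
    have e2 : ("#".toList) = ['#'] := rfl
    have e3 : ("-".toList) = ['-'] := rfl
    have e4 : (",".toList) = [','] := rfl
    have e5 : (".".toList) = ['.'] := rfl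
    have e6 : (";".toList) = [';'] := rfl
    rw [e1, e2, e3, e4, e5, e6]
    rw [pv_replace_eq _ _ _ (by simp), pv_replace_eq _ _ _ (by simp),
        pv_replace_eq _ _ _ (by simp), pv_replace_eq _ _ _ (by simp)]
    rw [pv_repl_single, pv_repl_single, pv_repl_single, pv_repl_single]
    rw [List.map_map, List.map_map, List.map_map]
    refine List.map_congr_left fun c _ => ?_
    simpa only [Function.comp] using pv_tr_comp c
  rw [hch]
  rfl
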